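-- pv_equiv track=rewrite | github.com/Yangel300/Sistemas_Embebidos_2025-2 | Proyecto/lidar8.py | count_objects
-- ===== SOURCE A (Python) =====
-- def count_objects(points, angle_gap=5, distance_gap=50):
--     """
--     Cluster points into objects.
--     Returns:
--         num_objects, clusters
--         - num_objects: integer
--         - clusters: list of clusters, each cluster is a list of (angle, dist)
--     """
--
--     if not points:
--         return 0, []
--
--     # Sort by angle
--     points = sorted(points, key=lambda x: x[0])
--
--     clusters = []
--     current_cluster = [points[0]]
--
--     for i in range(1, len(points)):
--         angle_diff = abs(points[i][0] - points[i-1][0])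
--         dist_diff = abs(points[i][1] - points[i-1][1])
--
--         # Start a new object
--         if angle_diff > angle_gap or dist_diff > distance_gap:
--             clusters.append(current_cluster)
--             current_cluster = [points[i]]
--         else:
--             current_cluster.append(points[i])
--
--     clusters.append(current_cluster)  # last cluster
--
--     return len(clusters), clusters
-- ===== SOURCE B (Python) =====
-- def count_objects(points, angle_gap=5, distance_gap=50):
--     if not points:
--         return 0, []
--     pts = sorted(points, key=lambda x: x[0])
--     n = len(pts)
--     breaks = [i for i in range(1, n)
--               if abs(pts[i][0] - pts[i-1][0]) > angle_gap
--               or abs(pts[i][1] - pts[i-1][1]) > distance_gap]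
--     bounds = [0] + breaks + [n]
--     clusters = [pts[a:b] for a, b in zip(bounds, bounds[1:])]
--     return len(clusters), clusters
-- ===== Notes on version B (the rewrite author's own statement) =====
-- stated objective: alternative
-- what changed: Replaces A's stateful accumulator loop (growing a current cluster and a cluster list) by first collecting the break indices with a filter over index pairs and then materialising each cluster as a slice between consecutive boundaries.
import Mathlib
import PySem

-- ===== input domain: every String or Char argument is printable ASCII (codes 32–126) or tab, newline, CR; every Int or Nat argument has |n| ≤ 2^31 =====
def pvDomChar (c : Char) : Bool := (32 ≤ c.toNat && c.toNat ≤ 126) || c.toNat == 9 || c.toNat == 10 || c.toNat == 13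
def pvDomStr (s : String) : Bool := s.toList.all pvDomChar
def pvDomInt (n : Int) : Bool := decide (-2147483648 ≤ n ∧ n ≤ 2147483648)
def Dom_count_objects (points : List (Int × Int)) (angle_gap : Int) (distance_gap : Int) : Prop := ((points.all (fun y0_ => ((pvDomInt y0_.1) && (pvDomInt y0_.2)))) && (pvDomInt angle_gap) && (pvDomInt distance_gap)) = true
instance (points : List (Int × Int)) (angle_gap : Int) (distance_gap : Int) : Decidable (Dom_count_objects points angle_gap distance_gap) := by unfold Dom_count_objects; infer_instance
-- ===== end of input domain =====

-- B replaces A's accumulator loop by break-index collection plus boundary slicing (alternative decomposition, same cost).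

-- ===== PORT A =====
-- literal transliteration of A: sort, then a fold over range(1, n) carrying (clusters, current_cluster)
def count_objects (points : List (Int × Int)) (angle_gap : Int) (distance_gap : Int) : Int × (List (List (Int × Int))) :=
  if points = [] then (0, [])
  else
    let pts := PySem.List.sorted points (fun x => x.1) false
    let st := (PySem.List.pyRange 1 (PySem.List.len pts) 1).foldl
      (fun (st : List (List (Int × Int)) × List (Int × Int)) i =>
        let angle_diff := |(PySem.List.pyGetD pts i (0, 0)).1 - (PySem.List.pyGetD pts (i - 1) (0, 0)).1|
        let dist_diff := |(PySem.List.pyGetD pts i (0, 0)).2 - (PySem.List.pyGetD pts (i - 1) (0, 0)).2|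
        if decide (angle_diff > angle_gap) || decide (dist_diff > distance_gap) then
          (st.1 ++ [st.2], [PySem.List.pyGetD pts i (0, 0)])
        else
          (st.1, st.2 ++ [PySem.List.pyGetD pts i (0, 0)]))
      ([], [PySem.List.pyGetD pts 0 (0, 0)])
    let clusters := st.1 ++ [st.2]
    ((clusters.length : Int), clusters)

-- ===== PORT B =====
-- literal transliteration of B: break indices by a filter, boundaries, clusters as slices
def count_objects_alt (points : List (Int × Int)) (angle_gap : Int) (distance_gap : Int) : Int × (List (List (Int × Int))) :=
  if points = [] then (0, [])
  else
    let pts := PySem.List.sorted points (fun x => x.1) false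
    let n := PySem.List.len pts
    let breaks := (PySem.List.pyRange 1 n 1).filter (fun i =>
      decide (|(PySem.List.pyGetD pts i (0, 0)).1 - (PySem.List.pyGetD pts (i - 1) (0, 0)).1| > angle_gap) ||
      decide (|(PySem.List.pyGetD pts i (0, 0)).2 - (PySem.List.pyGetD pts (i - 1) (0, 0)).2| > distance_gap))
    let bounds := 0 :: (breaks ++ [n])
    let clusters := (bounds.zip bounds.tail).map (fun ab => PySem.List.slice pts (some ab.1) (some ab.2))
    ((clusters.length : Int), clusters)

-- ===== PRECONDITION & SPEC =====
def Spec_count_objects (points : List (Int × Int)) (angle_gap : Int) (distance_gap : Int) (out : Int × (List (List (Int × Int)))) : Prop := out = count_objects_alt points angle_gap distance_gap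
instance (points : List (Int × Int)) (angle_gap : Int) (distance_gap : Int) (out : Int × (List (List (Int × Int)))) : Decidable (Spec_count_objects points angle_gap distance_gap out) := by unfold Spec_count_objects; infer_instance

-- ===== CLAIM (what is proved, stated in full; the proofs are below) =====
def Claim_equal_count_objects : Prop := ∀ (points : List (Int × Int)) (angle_gap : Int) (distance_gap : Int), Dom_count_objects points angle_gap distance_gap → Spec_count_objects points angle_gap distance_gap (count_objects points angle_gap distance_gap)

-- ===== LEMMAS AND PROOFS =====

-- append one element to a slice on its right boundary
lemma slice_snoc (ps : List (Int × Int)) (s a : Int) (hs : 0 ≤ s) (hsa : s ≤ a)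
    (ha : a < (ps.length : Int)) :
    PySem.List.slice ps (some s) (some (a + 1)) =
      PySem.List.slice ps (some s) (some a) ++ [PySem.List.pyGetD ps a (0, 0)] := by
  have h0a : (0 : Int) ≤ a := le_trans hs hsa
  rw [PySem.List.slice_toNat ps hs (by omega), PySem.List.slice_toNat ps hs h0a,
      PySem.List.pyGetD_eq_getElem ps (0,0) h0a ha]
  have h1 : (a + 1).toNat - s.toNat = (a.toNat - s.toNat) + 1 := by omega
  rw [h1, List.take_add_one]
  congr 1
  have hdl : a.toNat - s.toNat < (ps.drop s.toNat).length := by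
    simp [List.length_drop]; omega
  rw [List.getElem?_eq_getElem hdl]
  simp [List.getElem_drop]
  congr 1
  omega

-- the empty slice at a point
lemma slice_nil (ps : List (Int × Int)) (a : Int) (ha : 0 ≤ a) :
    PySem.List.slice ps (some a) (some a) = [] := by
  rw [PySem.List.slice_toNat ps ha ha]
  simp

-- main invariant: the tail of A's fold, started on a slice [s:a), equals the slices
-- between the boundaries s :: (breaks from a) ++ [n]
lemma loop_eq_slices (ps : List (Int × Int)) (g : Int → Bool) :
    ∀ (k : ℕ) (a s : Int) (acc : List (List (Int × Int))) (cur : List (Int × Int)),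
      a + (k : Int) = (ps.length : Int) → 0 ≤ s → s < a →
      cur = PySem.List.slice ps (some s) (some a) →
      (let st := (PySem.List.pyRange a (ps.length : Int) 1).foldl
          (fun (st : List (List (Int × Int)) × List (Int × Int)) i =>
            if g i then (st.1 ++ [st.2], [PySem.List.pyGetD ps i (0, 0)])
            else (st.1, st.2 ++ [PySem.List.pyGetD ps i (0, 0)]))
          (acc, cur);
        st.1 ++ [st.2])
      = acc ++ (let bounds := s :: ((PySem.List.pyRange a (ps.length : Int) 1).filter g ++ [(ps.length : Int)]);
          (bounds.zip bounds.tail).map (fun ab => PySem.List.slice ps (some ab.1) (some ab.2))) := by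
  intro k
  induction k with
  | zero =>
    intro a s acc cur hk hs hsa hcur
    have ha : a = (ps.length : Int) := by omega
    subst ha
    rw [PySem.List.pyRange_one_eq_nil le_rfl]
    simp [hcur]
  | succ k ih =>
    intro a s acc cur hk hs hsa hcur
    have halt : a < (ps.length : Int) := by
      have : (0:Int) ≤ (k:Int) := Int.natCast_nonneg k
      omega
    rw [PySem.List.pyRange_one_cons halt]
    simp only [List.foldl_cons, List.filter_cons]
    by_cases hg : g a
    · simp only [hg, if_true]
      have ih' := ih (a+1) a (acc ++ [cur]) [PySem.List.pyGetD ps a (0,0)]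
        (by omega) (by omega) (by omega)
        (by rw [slice_snoc ps a a (by omega) le_rfl halt, slice_nil ps a (by omega)]; simp)
      simp only at ih' ⊢
      rw [ih']
      simp only [List.cons_append, List.zip_cons_cons, List.map_cons, List.append_assoc,
        List.tail_cons]
      rw [← hcur]
      simp
    · simp only [hg, Bool.false_eq_true, if_false]
      have ih' := ih (a+1) s acc (cur ++ [PySem.List.pyGetD ps a (0,0)])
        (by omega) hs (by omega)
        (by rw [slice_snoc ps s a hs (by omega) halt, hcur])
      simp only at ih' ⊢
      rw [ih']

-- ===== VERDICT (by name: the statement is the Claim_ definition above) =====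
theorem count_objects_spec : Claim_equal_count_objects := by
  intro points angle_gap distance_gap _
  unfold Spec_count_objects count_objects count_objects_alt
  by_cases hemp : points = []
  · simp [hemp]
  · simp only [if_neg hemp]
    set pts := PySem.List.sorted points (fun x => x.1) false with hpts
    have hne : pts ≠ [] := by
      intro h
      exact hemp (List.Perm.eq_nil ((PySem.List.sorted_perm points (fun x => x.1) false).symm.trans (h ▸ List.Perm.refl _)))
    have hlen : 1 ≤ (pts.length : Int) := by
      have : 0 < pts.length := List.length_pos_iff.mpr hne
      omega
    have h0 : [PySem.List.pyGetD pts 0 (0,0)] = PySem.List.slice pts (some 0) (some 1) := by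
      rw [show (1 : Int) = 0 + 1 by ring,
        slice_snoc pts 0 0 le_rfl le_rfl (by omega), slice_nil pts 0 le_rfl]
      simp
    have key := loop_eq_slices pts
      (fun i =>
        decide (|(PySem.List.pyGetD pts i (0, 0)).1 - (PySem.List.pyGetD pts (i - 1) (0, 0)).1| > angle_gap) ||
        decide (|(PySem.List.pyGetD pts i (0, 0)).2 - (PySem.List.pyGetD pts (i - 1) (0, 0)).2| > distance_gap))
      (pts.length - 1) 1 0 [] [PySem.List.pyGetD pts 0 (0,0)]
      (by omega) le_rfl (by omega) h0
    simp only [PySem.List.len_eq] at *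
    rw [key]
    simp
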